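-- pv_equiv track=rewrite | github.com/OuluBSD/ai-upp | script/build.py | select_config
-- ===== SOURCE A (Python) =====
-- def config_matches_os(name, is_windows):
--     lower = name.lower()
--     has_windows = "windows" in lower
--     has_posix = "posix" in lower
--     if has_windows and not is_windows:
--         return False
--     if has_posix and is_windows:
--         return False
--     return True
--
-- def select_config(configs, conf_mode, is_windows):
--     eligible = [cfg for cfg in configs if config_matches_os(cfg["name"], is_windows)]
--     if not configs:
--         return None, None
--     if conf_mode is None:
--         if eligible:
--             return eligible[0], configs.index(eligible[0])
--         return None, None
--     mode = conf_mode.lower()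
--     for cfg in eligible:
--         name_lower = cfg["name"].lower()
--         if mode == "release" and "release" in name_lower:
--             return cfg, configs.index(cfg)
--         if mode == "debug" and "debug" in name_lower:
--             return cfg, configs.index(cfg)
--     return None, None
-- ===== SOURCE B (Python) =====
-- def select_config(configs, conf_mode, is_windows):
--     if not configs:
--         return None, None
--     mode = conf_mode.lower() if conf_mode is not None else None
--     for i, cfg in enumerate(configs):
--         name_lower = cfg["name"].lower()
--         if "windows" in name_lower and not is_windows:
--             continue
--         if "posix" in name_lower and is_windows:
--             continue
--         if mode is None:
--             return cfg, i
--         if mode in ("release", "debug") and mode in name_lower: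
--             return cfg, i
--     return None, None
-- ===== Notes on version B (the rewrite author's own statement) =====
-- stated objective: faster
-- what changed: Replaced the build-eligible-list-then-rescan-with-configs.index() structure by a single enumerate pass that tracks the index directly, so no intermediate list is built and no O(n) .index rescan happens.
import Mathlib
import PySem

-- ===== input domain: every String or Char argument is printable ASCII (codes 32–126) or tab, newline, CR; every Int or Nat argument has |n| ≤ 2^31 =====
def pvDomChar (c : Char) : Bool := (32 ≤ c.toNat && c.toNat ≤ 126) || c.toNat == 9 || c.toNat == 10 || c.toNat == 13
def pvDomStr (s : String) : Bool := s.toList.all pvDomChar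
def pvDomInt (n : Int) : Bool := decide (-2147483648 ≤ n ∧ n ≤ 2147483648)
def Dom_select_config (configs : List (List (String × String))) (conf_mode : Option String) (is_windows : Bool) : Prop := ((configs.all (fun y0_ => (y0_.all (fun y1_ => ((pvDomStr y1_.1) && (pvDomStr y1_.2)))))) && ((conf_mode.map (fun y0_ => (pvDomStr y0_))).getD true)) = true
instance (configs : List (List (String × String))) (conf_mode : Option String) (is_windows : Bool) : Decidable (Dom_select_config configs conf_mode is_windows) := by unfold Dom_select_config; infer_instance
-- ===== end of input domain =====

-- B replaces A's build-eligible-list-then-configs.index() rescan by one enumerate pass that carries the index.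

-- ===== PORT A =====

-- cfg["name"]: first-match association-list lookup; KeyError (none) is excluded by Pre_, so getD "" is only a formal total-izer.
def pvName (cfg : List (String × String)) : String :=
  ((PySem.Dict.mk cfg).get? "name").getD ""

-- Python's `==` on dicts ignores insertion order: same key set and same value per key.
def pvDictEq (a b : List (String × String)) : Bool :=
  (a.map Prod.fst).all (fun k => (PySem.Dict.mk a).get? k == (PySem.Dict.mk b).get? k) &&
  (b.map Prod.fst).all (fun k => (PySem.Dict.mk b).get? k == (PySem.Dict.mk a).get? k)

-- configs.index(cfg): index of the first dict-equal element (exact: Python compares dicts with ==; ValueError = none, unreachable here).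
def pvIndexDict (configs : List (List (String × String))) (cfg : List (String × String)) : Option Int :=
  match configs with
  | [] => none
  | c :: rest => if pvDictEq c cfg then some 0 else (pvIndexDict rest cfg).map (· + 1)

def config_matches_os (name : String) (is_windows : Bool) : Bool :=
  let lower := PySem.Str.lower name
  let has_windows := PySem.Str.isIn "windows" lower
  let has_posix := PySem.Str.isIn "posix" lower
  if has_windows && !is_windows then false
  else if has_posix && is_windows then false
  else true

-- the 'for cfg in eligible' loop of A's mode branch
def pvFindLoop (configs : List (List (String × String))) (mode : String) :
    List (List (String × String)) → (Option (List (String × String))) × Option Int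
  | [] => (none, none)
  | cfg :: rest =>
    let name_lower := PySem.Str.lower (pvName cfg)
    if mode == "release" && PySem.Str.isIn "release" name_lower then (some cfg, pvIndexDict configs cfg)
    else if mode == "debug" && PySem.Str.isIn "debug" name_lower then (some cfg, pvIndexDict configs cfg)
    else pvFindLoop configs mode rest

def select_config (configs : List (List (String × String))) (conf_mode : Option String) (is_windows : Bool) : (Option (List (String × String))) × Option Int :=
  let eligible := configs.filter (fun cfg => config_matches_os (pvName cfg) is_windows)
  if configs.isEmpty then (none, none)
  else
    match conf_mode with
    | none =>
      match eligible with
      | [] => (none, none)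
      | e :: _ => (some e, pvIndexDict configs e)
    | some cm =>
      let mode := PySem.Str.lower cm
      pvFindLoop configs mode eligible

-- ===== PORT B =====

-- the single enumerate pass of Source B
def pvGoAlt (mode : Option String) (is_windows : Bool) :
    List (List (String × String)) → Int → (Option (List (String × String))) × Option Int
  | [], _ => (none, none)
  | cfg :: rest, i =>
    let name_lower := PySem.Str.lower (pvName cfg)
    if PySem.Str.isIn "windows" name_lower && !is_windows then pvGoAlt mode is_windows rest (i + 1)
    else if PySem.Str.isIn "posix" name_lower && is_windows then pvGoAlt mode is_windows rest (i + 1)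
    else
      match mode with
      | none => (some cfg, some i)
      | some m =>
        if (m == "release" || m == "debug") && PySem.Str.isIn m name_lower then (some cfg, some i)
        else pvGoAlt mode is_windows rest (i + 1)

def select_config_alt (configs : List (List (String × String))) (conf_mode : Option String) (is_windows : Bool) : (Option (List (String × String))) × Option Int :=
  if configs.isEmpty then (none, none)
  else pvGoAlt (conf_mode.map PySem.Str.lower) is_windows configs 0

-- ===== PRECONDITION & SPEC =====
-- Pre_ excludes exactly the inputs where A raises KeyError: some config without a "name" key.
def Pre_select_config (configs : List (List (String × String))) (conf_mode : Option String) (is_windows : Bool) : Prop :=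
  ∀ cfg ∈ configs, "name" ∈ cfg.map Prod.fst

instance (configs : List (List (String × String))) (conf_mode : Option String) (is_windows : Bool) : Decidable (Pre_select_config configs conf_mode is_windows) := by unfold Pre_select_config; infer_instance

def pvWitness_select_config : (List (List (String × String))) × Option String × Bool :=
  ([[("name", "Release win")], [("name", "Debug")]], some "debug", false)

def Spec_select_config (configs : List (List (String × String))) (conf_mode : Option String) (is_windows : Bool) (out : (Option (List (String × String))) × Option Int) : Prop := out = select_config_alt configs conf_mode is_windows
instance (configs : List (List (String × String))) (conf_mode : Option String) (is_windows : Bool) (out : (Option (List (String × String))) × Option Int) : Decidable (Spec_select_config configs conf_mode is_windows out) := by unfold Spec_select_config; infer_instance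

-- ===== CLAIM (what is proved, stated in full; the proofs are below) =====
def Claim_equal_select_config : Prop := ∀ (configs : List (List (String × String))) (conf_mode : Option String) (is_windows : Bool), Dom_select_config configs conf_mode is_windows → Pre_select_config configs conf_mode is_windows → Spec_select_config configs conf_mode is_windows (select_config configs conf_mode is_windows)

-- ===== LEMMAS AND PROOFS =====

-- eligibility predicate (A's filter condition / B's skip condition)
def pvP (is_windows : Bool) (cfg : List (String × String)) : Bool :=
  config_matches_os (pvName cfg) is_windows

-- combined "this config is returned" predicate
def pvQ (mode : Option String) (is_windows : Bool) (cfg : List (String × String)) : Bool :=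
  pvP is_windows cfg &&
    (match mode with
     | none => true
     | some m =>
       (m == "release" && PySem.Str.isIn "release" (PySem.Str.lower (pvName cfg))) ||
       (m == "debug" && PySem.Str.isIn "debug" (PySem.Str.lower (pvName cfg))))

def pvBump (p : (Option (List (String × String))) × Option Int) : (Option (List (String × String))) × Option Int :=
  (p.1, p.2.map (· + 1))

theorem pvGet?_mk_none {l : List (String × String)} {k : String}
    (h : k ∉ l.map Prod.fst) : (PySem.Dict.mk l).get? k = none := by
  induction l with
  | nil => simp [PySem.Dict.get?]
  | cons p rest ih =>
    simp only [List.map_cons, List.mem_cons, not_or] at h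
    rw [show (PySem.Dict.mk (p :: rest)) = PySem.Dict.mk ((p.1, p.2) :: rest) from rfl,
        PySem.Dict.get?_mk_cons]
    simp only [beq_iff_eq]
    rw [if_neg (fun hh => h.1 hh.symm)]
    exact ih h.2

theorem pvDictEq_refl (a : List (String × String)) : pvDictEq a a = true := by
  simp [pvDictEq, List.all_eq_true]

theorem pvName_eq_of_dictEq {a b : List (String × String)} (h : pvDictEq a b = true) :
    pvName a = pvName b := by
  unfold pvDictEq at h
  rw [Bool.and_eq_true, List.all_eq_true, List.all_eq_true] at h
  obtain ⟨h1, h2⟩ := h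
  unfold pvName
  by_cases ha : "name" ∈ a.map Prod.fst
  · have := h1 _ ha
    rw [beq_iff_eq] at this
    rw [this]
  · by_cases hb : "name" ∈ b.map Prod.fst
    · have := h2 _ hb
      rw [beq_iff_eq] at this
      rw [this]
    · rw [pvGet?_mk_none ha, pvGet?_mk_none hb]

theorem pvQ_eq_of_dictEq {a b : List (String × String)} (mode : Option String)
    (is_windows : Bool) (h : pvDictEq a b = true) :
    pvQ mode is_windows a = pvQ mode is_windows b := by
  simp only [pvQ, pvP, pvName_eq_of_dictEq h]

theorem pvGoAlt_bump (mode : Option String) (is_windows : Bool)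
    (l : List (List (String × String))) (i : Int) :
    pvGoAlt mode is_windows l (i + 1) = pvBump (pvGoAlt mode is_windows l i) := by
  induction l generalizing i with
  | nil => simp [pvGoAlt, pvBump]
  | cons c r ih =>
    cases mode with
    | none =>
      simp only [pvGoAlt]
      split_ifs with h1 h2
      · exact ih (i + 1)
      · exact ih (i + 1)
      · simp [pvBump]
    | some m =>
      simp only [pvGoAlt]
      split_ifs with h1 h2 h3
      · exact ih (i + 1)
      · exact ih (i + 1)
      · simp [pvBump]
      · exact ih (i + 1)

theorem pvCond_eq (m : String) (is_windows : Bool) (c : List (String × String))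
    (hP : pvP is_windows c = true) :
    ((m == "release" || m == "debug") && PySem.Str.isIn m (PySem.Str.lower (pvName c))) =
      pvQ (some m) is_windows c := by
  simp only [pvQ, hP, Bool.true_and]
  by_cases hr : m = "release"
  · subst hr; simp
  · by_cases hd : m = "debug"
    · subst hd; simp
    · have h1 : (m == "release") = false := beq_eq_false_iff_ne.mpr hr
      have h2 : (m == "debug") = false := beq_eq_false_iff_ne.mpr hd
      simp [h1, h2]

-- one step of B's pass, phrased with pvQ
theorem pvGoAlt_cons (mode : Option String) (is_windows : Bool)
    (c : List (String × String)) (r : List (List (String × String))) (i : Int) :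
    pvGoAlt mode is_windows (c :: r) i =
      if pvQ mode is_windows c then (some c, some i) else pvGoAlt mode is_windows r (i + 1) := by
  cases hw : (PySem.Str.isIn "windows" (PySem.Str.lower (pvName c)) && !is_windows) with
  | true =>
    have hq : pvQ mode is_windows c = false := by
      simp only [pvQ, pvP, config_matches_os, hw, if_true, Bool.false_and]
    simp only [pvGoAlt, hw, if_true, hq, Bool.false_eq_true, if_false]
  | false =>
    cases hp : (PySem.Str.isIn "posix" (PySem.Str.lower (pvName c)) && is_windows) with
    | true =>
      have hq : pvQ mode is_windows c = false := by
        simp only [pvQ, pvP, config_matches_os, hw, hp, if_true, Bool.false_eq_true,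
          if_false, Bool.false_and]
      simp only [pvGoAlt, hw, hp, Bool.false_eq_true, if_false, if_true, hq]
    | false =>
      have hP : pvP is_windows c = true := by
        simp only [pvP, config_matches_os, hw, hp, Bool.false_eq_true, if_false]
      cases mode with
      | none =>
        have hq : pvQ none is_windows c = true := by simp [pvQ, hP]
        simp only [pvGoAlt, hw, hp, Bool.false_eq_true, if_false, hq, if_true]
      | some m =>
        simp only [pvGoAlt, hw, hp, Bool.false_eq_true, if_false, pvCond_eq m is_windows c hP]

-- shifting A's mode-branch loop past a non-matching head config
theorem pvFindLoop_shift (m : String) (is_windows : Bool)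
    (c : List (String × String)) (r el : List (List (String × String)))
    (hc : pvQ (some m) is_windows c = false)
    (hel : ∀ e ∈ el, pvP is_windows e = true) :
    pvFindLoop (c :: r) m el = pvBump (pvFindLoop r m el) := by
  induction el with
  | nil => simp [pvFindLoop, pvBump]
  | cons e el' ih =>
    have hPe : pvP is_windows e = true := hel e (List.mem_cons_self ..)
    have hel' : ∀ x ∈ el', pvP is_windows x = true := fun x hx => hel x (List.mem_cons_of_mem _ hx)
    cases h1 : (m == "release" && PySem.Str.isIn "release" (PySem.Str.lower (pvName e))) with
    | true =>
      have hQe : pvQ (some m) is_windows e = true := by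
        simp only [pvQ, hPe, Bool.true_and, h1, Bool.true_or]
      have hne : pvDictEq c e = false := by
        by_contra hcon
        rw [Bool.not_eq_false] at hcon
        rw [pvQ_eq_of_dictEq (some m) is_windows hcon, hQe] at hc
        exact absurd hc (by decide)
      obtain ⟨hm, hin⟩ : m = "release" ∧
          PySem.Str.isIn "release" (PySem.Str.lower (pvName e)) = true := by
        simpa using h1
      subst hm
      simp only [pvFindLoop]
      rw [if_pos h1, if_pos h1]
      simp [pvIndexDict, hne, pvBump]
    | false =>
      cases h2 : (m == "debug" && PySem.Str.isIn "debug" (PySem.Str.lower (pvName e))) with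
      | true =>
        have hQe : pvQ (some m) is_windows e = true := by
          simp only [pvQ, hPe, Bool.true_and, h2, Bool.or_true]
        have hne : pvDictEq c e = false := by
          by_contra hcon
          rw [Bool.not_eq_false] at hcon
          rw [pvQ_eq_of_dictEq (some m) is_windows hcon, hQe] at hc
          exact absurd hc (by decide)
        obtain ⟨hm, hin⟩ : m = "debug" ∧
            PySem.Str.isIn "debug" (PySem.Str.lower (pvName e)) = true := by
          simpa using h2
        subst hm
        simp only [pvFindLoop]
        have hx : ¬ (("debug" == "release" && PySem.Str.isIn "release" (PySem.Str.lower (pvName e))) = true) := by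
          simp only [h1]
          decide
        rw [if_neg hx, if_neg hx, if_pos h2, if_pos h2]
        simp [pvIndexDict, hne, pvBump]
      | false =>
        simp only [pvFindLoop, h1, h2, Bool.false_eq_true, if_false]
        exact ih hel'

-- A's whole body (past the empty check), as a function of the lowered mode
def pvACore (mode : Option String) (is_windows : Bool)
    (configs : List (List (String × String))) : (Option (List (String × String))) × Option Int :=
  match mode with
  | none =>
    match configs.filter (fun cfg => pvP is_windows cfg) with
    | [] => (none, none)
    | e :: _ => (some e, pvIndexDict configs e)
  | some m => pvFindLoop configs m (configs.filter (fun cfg => pvP is_windows cfg))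

theorem pvMain (mode : Option String) (is_windows : Bool)
    (configs : List (List (String × String))) :
    pvACore mode is_windows configs = pvGoAlt mode is_windows configs 0 := by
  induction configs with
  | nil => cases mode <;> simp [pvACore, pvGoAlt, pvFindLoop]
  | cons c r ih =>
    rw [pvGoAlt_cons]
    cases hq : pvQ mode is_windows c with
    | true =>
      rw [if_pos rfl]
      have hPc : pvP is_windows c = true := by
        have h := hq
        simp only [pvQ, Bool.and_eq_true] at h
        exact h.1
      cases mode with
      | none =>
        simp only [pvACore, List.filter_cons, hPc, if_true]
        simp [pvIndexDict, pvDictEq_refl]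
      | some m =>
        simp only [pvACore, List.filter_cons, hPc, if_true]
        have hsub : ((m == "release" && PySem.Str.isIn "release" (PySem.Str.lower (pvName c))) ||
            (m == "debug" && PySem.Str.isIn "debug" (PySem.Str.lower (pvName c)))) = true := by
          have h := hq
          simp only [pvQ, hPc, Bool.true_and] at h
          simpa using h
        cases h1 : (m == "release" && PySem.Str.isIn "release" (PySem.Str.lower (pvName c))) with
        | true =>
          simp only [pvFindLoop, h1, if_true]
          simp [pvIndexDict, pvDictEq_refl]
        | false =>
          have h2 : (m == "debug" && PySem.Str.isIn "debug" (PySem.Str.lower (pvName c))) = true := by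
            rw [h1] at hsub
            simpa using hsub
          simp only [pvFindLoop, h1, Bool.false_eq_true, if_false, h2, if_true]
          simp [pvIndexDict, pvDictEq_refl]
    | false =>
      rw [if_neg (by decide : ¬ (false = true))]
      rw [pvGoAlt_bump, ← ih]
      have hfilt : ∀ e ∈ r.filter (fun cfg => pvP is_windows cfg), pvP is_windows e = true :=
        fun e he => (List.mem_filter.mp he).2
      cases mode with
      | none =>
        have hPc : pvP is_windows c = false := by simpa [pvQ] using hq
        simp only [pvACore, List.filter_cons, hPc, Bool.false_eq_true, if_false]
        cases hE : r.filter (fun cfg => pvP is_windows cfg) with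
        | nil => simp [pvBump]
        | cons e tl =>
          have he : e ∈ r.filter (fun cfg => pvP is_windows cfg) := by
            rw [hE]; exact List.mem_cons_self ..
          have hPe : pvP is_windows e = true := (List.mem_filter.mp he).2
          have hne : pvDictEq c e = false := by
            by_contra hcon
            rw [Bool.not_eq_false] at hcon
            have h := pvQ_eq_of_dictEq none is_windows hcon
            simp [pvQ, hPc, hPe] at h
          simp [pvIndexDict, hne, pvBump]
      | some m =>
        cases hPc : pvP is_windows c with
        | true =>
          simp only [pvACore, List.filter_cons, hPc, if_true]
          have hsub : ((m == "release" && PySem.Str.isIn "release" (PySem.Str.lower (pvName c))) = false) ∧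
              ((m == "debug" && PySem.Str.isIn "debug" (PySem.Str.lower (pvName c))) = false) := by
            have h := hq
            simp only [pvQ, hPc, Bool.true_and, Bool.or_eq_false_iff] at h
            exact h
          simp only [pvFindLoop, hsub.1, hsub.2, Bool.false_eq_true, if_false]
          exact pvFindLoop_shift m is_windows c r _ hq hfilt
        | false =>
          simp only [pvACore, List.filter_cons, hPc, Bool.false_eq_true, if_false]
          exact pvFindLoop_shift m is_windows c r _ hq hfilt

-- ===== VERDICT (by name: the statement is the Claim_ definition above) =====
theorem select_config_spec : Claim_equal_select_config := by
  intro configs conf_mode is_windows _hdom _hpre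
  unfold Spec_select_config select_config select_config_alt
  cases configs with
  | nil => cases conf_mode <;> rfl
  | cons c r =>
    simp only [List.isEmpty_cons, Bool.false_eq_true, if_false]
    cases conf_mode with
    | none => exact pvMain none is_windows (c :: r)
    | some cm => exact pvMain (some (PySem.Str.lower cm)) is_windows (c :: r)
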